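-- pv_equiv track=rewrite | github.com/Kuldr/Advent-of-Code | 2022/05/solution.py | parseStack
-- ===== SOURCE A (Python) =====
-- def parseStack(stackStr):
--     lines = stackStr.split("\n")
--     nStacks = (len(lines[-1]) + 1) // 4
--
--     stacks = [[] for _ in range(nStacks)]
--     for line in reversed(lines[:-1]):
--         for s in range(nStacks):
--             if (char := line[1+s*4]) != " ":
--                 stacks[s].append(char)
--
--     return stacks
-- ===== SOURCE B (Python) =====
-- # Grid + transpose: build the full crate matrix, pivot it with zip, filter padding per column.
-- def parseStack(stackStr):
--     lines = stackStr.split("\n")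
--     nStacks = (len(lines[-1]) + 1) // 4
--     rows = [[line[1 + s * 4] for s in range(nStacks)]
--             for line in reversed(lines[:-1])]
--     if not rows:
--         return [[] for _ in range(nStacks)]
--     return [[c for c in col if c != " "] for col in zip(*rows)]
-- ===== Notes on version B (the rewrite author's own statement) =====
-- stated objective: alternative
-- what changed: Replaces A's per-stack accumulators mutated during a row scan by an explicit grid built row-wise, transposed with zip(*rows), then space-filtered per column.
import Mathlib
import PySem

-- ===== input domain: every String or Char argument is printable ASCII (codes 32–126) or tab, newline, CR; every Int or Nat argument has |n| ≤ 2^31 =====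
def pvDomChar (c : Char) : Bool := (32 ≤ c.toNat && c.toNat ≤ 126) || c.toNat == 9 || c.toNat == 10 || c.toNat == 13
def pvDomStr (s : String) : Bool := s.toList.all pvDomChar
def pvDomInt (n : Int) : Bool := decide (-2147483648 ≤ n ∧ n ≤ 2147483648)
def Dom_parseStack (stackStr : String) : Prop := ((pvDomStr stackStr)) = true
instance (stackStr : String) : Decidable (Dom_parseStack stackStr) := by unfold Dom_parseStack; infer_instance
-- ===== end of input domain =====

-- B differs from A by building the whole crate grid and transposing it instead of scattering
-- characters into per-stack accumulators during the row scan (objective: alternative decomposition).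

-- ===== PORT A =====
def parseStack (stackStr : String) : List (List String) :=
  let lines := (PySem.Str.split? stackStr "\n").getD []
  let nStacks := PySem.Int.floordiv (PySem.Str.len ((PySem.List.pyGet? lines (-1)).getD "") + 1) 4
  let stks := (PySem.List.pyRange 0 nStacks 1).map (fun _ => ([] : List String))
  ((PySem.List.slice lines none (some (-1))).reverse).foldl
    (fun stks line =>
      (PySem.List.pyRange 0 nStacks 1).foldl
        (fun stks s =>
          let char := (PySem.Str.pyGet? line (1 + s * 4)).getD ' '   -- default unreachable under Pre_
          if char ≠ ' ' then
            PySem.List.pySetD stks s ((PySem.List.pyGetD stks s []) ++ [String.ofList [char]])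
          else stks)
        stks)
    stks

-- ===== PORT B =====
-- model of the Python builtin zip(*rows): columns up to the shortest row's length
def zipStar (rows : List (List Char)) : List (List Char) :=
  match rows with
  | [] => []
  | r :: rs =>
    (List.range (rs.foldl (fun m row => min m row.length) r.length)).map
      (fun i => rows.map (fun row => row.getD i ' '))

def parseStack_alt (stackStr : String) : List (List String) :=
  let lines := (PySem.Str.split? stackStr "\n").getD []
  let nStacks := PySem.Int.floordiv (PySem.Str.len ((PySem.List.pyGet? lines (-1)).getD "") + 1) 4
  let rows := ((PySem.List.slice lines none (some (-1))).reverse).map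
      (fun line => (PySem.List.pyRange 0 nStacks 1).map
        (fun s => (PySem.Str.pyGet? line (1 + s * 4)).getD ' '))   -- default unreachable under Pre_
  if rows.isEmpty then (PySem.List.pyRange 0 nStacks 1).map (fun _ => ([] : List String))
  else (zipStar rows).map (fun col => (col.filter (fun c => c ≠ ' ')).map (fun c => String.ofList [c]))

-- ===== PRECONDITION & SPEC =====
-- Pre_ excludes exactly the inputs on which Python A raises IndexError: a crate line
-- (every line but the last) shorter than the rightmost column position 1 + 4*(nStacks-1).
def Pre_parseStack (stackStr : String) : Prop :=
  let lines := (PySem.Str.split? stackStr "\n").getD []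
  let nStacks := PySem.Int.floordiv (PySem.Str.len ((PySem.List.pyGet? lines (-1)).getD "") + 1) 4
  ∀ line ∈ lines.dropLast, 4 * nStacks - 2 ≤ PySem.Str.len line ∨ nStacks = 0
instance (stackStr : String) : Decidable (Pre_parseStack stackStr) := by unfold Pre_parseStack; infer_instance

def pvWitness_parseStack : String := "    [D]    \n[N] [C]    \n[Z] [M] [P]\n 1   2   3 "

def Spec_parseStack (stackStr : String) (out : List (List String)) : Prop := out = parseStack_alt stackStr
instance (stackStr : String) (out : List (List String)) : Decidable (Spec_parseStack stackStr out) := by unfold Spec_parseStack; infer_instance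

-- ===== CLAIM (what is proved, stated in full; the proofs are below) =====
def Claim_equal_parseStack : Prop := ∀ (stackStr : String), Dom_parseStack stackStr → Pre_parseStack stackStr → Spec_parseStack stackStr (parseStack stackStr)

-- ===== LEMMAS AND PROOFS =====

theorem pv_pyRange_zero (n : Int) :
    PySem.List.pyRange 0 n 1 = (List.range n.toNat).map (fun (k : Nat) => (k : Int)) := by
  rw [PySem.List.pyRange_one]
  simp [List.map_eq_flatMap]

theorem pv_set_map_range {α : Type} (n m : Nat) (h : Nat → α) (v : α) :
    ((List.range n).map h).set m v
      = (List.range n).map (fun k => if k = m then v else h k) := by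
  apply List.ext_getElem
  · simp
  · intro j h1 h2
    simp only [List.getElem_set, List.getElem_map, List.getElem_range]
    split_ifs with hj hj' hj'
    · rfl
    · exact absurd hj.symm hj'
    · exact absurd hj'.symm hj
    · rfl

theorem pv_getD_map_range {α : Type} (n i : Nat) (f : Nat → α) (d : α) (hi : i < n) :
    ((List.range n).map f).getD i d = f i := by
  simp [List.getD_eq_getElem?_getD, hi]

-- inner loop of A: one row scattered into all stks, as a map over indices
theorem pv_inner (G : Int → Char) (n m : Nat) (hm : m ≤ n) (h : Nat → List String) :
    ((List.range m).map (fun (k : Nat) => (k : Int))).foldl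
      (fun stks s =>
        if G s ≠ ' ' then
          PySem.List.pySetD stks s ((PySem.List.pyGetD stks s []) ++ [String.ofList [G s]])
        else stks)
      ((List.range n).map h)
    = (List.range n).map
        (fun k => if k < m then h k ++ (if G k ≠ ' ' then [String.ofList [G k]] else []) else h k) := by
  induction m generalizing h with
  | zero => simp
  | succ m ih =>
    rw [List.range_succ, List.map_append, List.foldl_append, ih (by omega)]
    have hlen : ((List.range n).map
        (fun k => if k < m then h k ++ (if G k ≠ ' ' then [String.ofList [G k]] else []) else h k)).length = n := by
      simp
    have hget : PySem.List.pyGetD ((List.range n).map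
        (fun k => if k < m then h k ++ (if G k ≠ ' ' then [String.ofList [G k]] else []) else h k)) (m : Int) []
        = h m := by
      rw [PySem.List.pyGetD_natCast, pv_getD_map_range n m _ [] (by omega)]
      simp
    simp only [List.map_cons, List.map_nil, List.foldl_cons, List.foldl_nil]
    by_cases hc : G (m : Int) ≠ ' '
    · rw [if_pos hc]
      rw [PySem.List.pySetD, PySem.List.pySet?_natCast _ _ _ (by rw [hlen]; omega), Option.getD_some, hget,
        pv_set_map_range]
      apply List.map_congr_left
      intro k hk
      rw [List.mem_range] at hk
      rcases eq_or_ne k m with rfl | hkm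
      · simp [hc]
      · have : ¬ k = m := hkm
        simp only [if_neg this]
        rcases lt_or_ge k m with hlt | hge
        · simp [hlt, Nat.lt_succ_of_lt hlt]
        · have h1 : ¬ k < m := by omega
          have h2 : ¬ k < m + 1 := by omega
          simp [h1, h2]
    · rw [if_neg hc]
      rw [not_not] at hc
      apply List.map_congr_left
      intro k hk
      rw [List.mem_range] at hk
      rcases lt_or_ge k m with hlt | hge
      · simp [hlt, Nat.lt_succ_of_lt hlt]
      · rcases eq_or_ne k m with rfl | hkm
        · simp [hc]
        · have h1 : ¬ k < m := by omega
          have h2 : ¬ k < m + 1 := by omega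
          simp [h1, h2]

-- outer loop of A equals per-column filtering
theorem pv_outer (G : String → Int → Char) (n : Nat) (h : Nat → List String)
    (ls : List String) :
    ls.foldl
      (fun stks line =>
        ((List.range n).map (fun (k : Nat) => (k : Int))).foldl
          (fun stks s =>
            if G line s ≠ ' ' then
              PySem.List.pySetD stks s ((PySem.List.pyGetD stks s []) ++ [String.ofList [G line s]])
            else stks)
          stks)
      ((List.range n).map h)
    = (List.range n).map (fun k =>
        h k ++ ((ls.map (fun line => G line (k : Int))).filter (fun c => c ≠ ' ')).map
          (fun c => String.ofList [c])) := by
  induction ls generalizing h with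
  | nil => simp
  | cons line rest ih =>
    rw [List.foldl_cons, pv_inner (G line) n n le_rfl h, ih]
    apply List.map_congr_left
    intro k hk
    rw [List.mem_range] at hk
    simp only [hk, if_pos, List.map_cons, List.filter_cons]
    by_cases hc : G line (k : Int) ≠ ' '
    · simp [hc, List.append_assoc]
    · rw [not_not] at hc
      simp [hc]

theorem pv_foldl_min (n : Nat) (rs : List (List Char)) (hrs : ∀ row ∈ rs, row.length = n) :
    rs.foldl (fun m row => min m row.length) n = n := by
  induction rs with
  | nil => rfl
  | cons r rest ih =>
    rw [List.foldl_cons, hrs r (List.mem_cons_self), min_self]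
    exact ih (fun row hrow => hrs row (List.mem_cons_of_mem _ hrow))

theorem pv_zipStar_rect (g : String → Nat → Char) (n : Nat) (ls : List String) (hls : ls ≠ []) :
    zipStar (ls.map (fun line => (List.range n).map (g line)))
      = (List.range n).map (fun k => ls.map (fun line => g line k)) := by
  obtain ⟨l, ls', rfl⟩ := List.exists_cons_of_ne_nil hls
  show zipStar ((List.range n).map (g l) :: ls'.map (fun line => (List.range n).map (g line))) = _
  rw [zipStar]
  rw [pv_foldl_min ((List.range n).map (g l)).length _
      (by intro row hrow; simp at hrow; obtain ⟨line, _, rfl⟩ := hrow; simp)]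
  simp only [List.length_map, List.length_range]
  apply List.map_congr_left
  intro i hi
  rw [List.mem_range] at hi
  show ((List.range n).map (g l) :: ls'.map (fun line => (List.range n).map (g line))).map
      (fun row => row.getD i ' ') = _
  rw [List.map_cons, List.map_map, List.map_cons]
  rw [pv_getD_map_range n i (g l) ' ' hi]
  congr 1
  apply List.map_congr_left
  intro line _
  exact pv_getD_map_range n i (g line) ' ' hi

-- ===== VERDICT (by name: the statement is the Claim_ definition above) =====
theorem parseStack_spec : Claim_equal_parseStack := by
  intro stackStr _ _
  unfold Spec_parseStack
  simp only [parseStack, parseStack_alt]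
  rw [pv_pyRange_zero]
  simp only [List.map_map, Function.comp_def]
  set L := (PySem.Str.split? stackStr "\n").getD [] with hL
  set n := (PySem.Int.floordiv (PySem.Str.len ((PySem.List.pyGet? L (-1)).getD "") + 1) 4).toNat with hn
  set R := (PySem.List.slice L none (some (-1))).reverse with hR
  rw [pv_outer (fun line s => (PySem.Str.pyGet? line (1 + s * 4)).getD ' ') n
      (fun _ => ([] : List String)) R]
  rcases eq_or_ne R [] with hRnil | hRne
  · rw [hRnil]
    simp
  · rw [if_neg (by simpa [List.isEmpty_iff] using hRne)]
    rw [pv_zipStar_rect (fun line (k : Nat) => (PySem.Str.pyGet? line (1 + (k : Int) * 4)).getD ' ') n R hRne]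
    rw [List.map_map]
    simp
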